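-- pv_equiv track=rewrite | github.com/denisonus/negative_sampling_analysis | scripts/prepare_gowalla_lightgcn.py | merge_user_interactions
-- ===== SOURCE A (Python) =====
-- from collections import defaultdict
-- from typing import Iterable
--
-- def merge_user_interactions(
--     sources: Iterable[dict[int, list[int]]],
-- ) -> dict[int, list[int]]:
--     """Merge multiple user->items mappings while preserving first-seen item order."""
--     merged = defaultdict(list)
--     seen_by_user: dict[int, set[int]] = defaultdict(set)
--
--     for source in sources:
--         for user_id, item_ids in source.items():
--             seen = seen_by_user[user_id]
--             for item_id in item_ids:
--                 if item_id in seen: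
--                     continue
--                 merged[user_id].append(item_id)
--                 seen.add(item_id)
--
--     return dict(sorted(merged.items()))
-- ===== SOURCE B (Python) =====
-- def merge_user_interactions(sources):
--     """Merge multiple user->items mappings while preserving first-seen item order."""
--     # Gather: concatenate every user's item lists across all sources, no dedup yet.
--     gathered = {}
--     for source in sources:
--         for user_id, item_ids in source.items():
--             gathered.setdefault(user_id, []).extend(item_ids)
--     # Deduplicate each concatenation in one step (dict.fromkeys keeps first-seen order),
--     # dropping users whose merged list is empty.
--     merged = {}
--     for user_id, items in gathered.items():
--         unique = list(dict.fromkeys(items))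
--         if unique:
--             merged[user_id] = unique
--     return dict(sorted(merged.items()))
-- ===== Notes on version B (the rewrite author's own statement) =====
-- stated objective: simpler
-- what changed: Replaces A's interleaved per-item set-membership/append loop with a gather-then-deduplicate decomposition: first concatenate each user's item lists across all sources, then dedup each concatenation in one step via dict.fromkeys and drop empty results.
import Mathlib
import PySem

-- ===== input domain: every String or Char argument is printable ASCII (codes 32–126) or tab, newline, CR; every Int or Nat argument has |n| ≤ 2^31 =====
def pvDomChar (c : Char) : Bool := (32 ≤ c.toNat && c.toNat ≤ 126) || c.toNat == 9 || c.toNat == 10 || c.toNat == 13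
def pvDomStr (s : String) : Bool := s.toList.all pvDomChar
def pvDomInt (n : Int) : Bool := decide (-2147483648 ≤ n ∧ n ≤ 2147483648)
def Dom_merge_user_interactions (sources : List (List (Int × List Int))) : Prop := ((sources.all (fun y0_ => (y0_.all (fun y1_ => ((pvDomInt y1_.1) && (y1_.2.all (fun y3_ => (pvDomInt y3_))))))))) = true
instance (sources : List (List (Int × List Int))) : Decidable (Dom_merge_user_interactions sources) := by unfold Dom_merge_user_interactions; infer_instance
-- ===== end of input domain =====

-- B replaces A's interleaved per-item membership/append loop by a gather-then-deduplicate
-- decomposition (concatenate each user's lists, then dedup once and drop empties): simpler, same cost.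

-- ===== PORT A =====
-- merged / seen_by_user are defaultdicts: merged[u].append(x) = modify u [] (· ++ [x]);
-- seen_by_user[u] reads the set (default empty) and the mutated set is written back after the item loop.
-- dict(sorted(merged.items())): a dict's keys are distinct, so Python's tuple comparison never
-- reads the second component — sorting by the first component is exact here.
def merge_user_interactions (sources : List (List (Int × List Int))) : List (Int × List Int) :=
  let st := sources.foldl (fun st source =>
      source.foldl (fun (st : PySem.Dict Int (List Int) × PySem.Dict Int (PySem.Set Int)) p =>
        let seen := st.2.getD p.1 PySem.Set.empty
        let ms := p.2.foldl (fun (ms : PySem.Dict Int (List Int) × PySem.Set Int) item_id =>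
            if PySem.Set.contains ms.2 item_id then ms
            else (ms.1.modify p.1 [] (fun l => l ++ [item_id]), PySem.Set.add ms.2 item_id))
          (st.1, seen)
        (ms.1, st.2.insert p.1 ms.2)) st)
    (PySem.Dict.empty, PySem.Dict.empty)
  PySem.List.sorted st.1.items (fun q => q.1) false

-- ===== PORT B =====
-- gathered.setdefault(u, []).extend(items) = modify u [] (· ++ items).
-- merged is a dict filled with FRESH keys only (gathered's keys are distinct), so building it
-- is exactly appending to a pair list; dict(sorted(...)) as in A (distinct keys, key = fst exact).
def merge_user_interactions_alt (sources : List (List (Int × List Int))) : List (Int × List Int) :=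
  let gathered : PySem.Dict Int (List Int) :=
    sources.foldl (fun g source =>
      source.foldl (fun (g : PySem.Dict Int (List Int)) p => g.modify p.1 [] (fun l => l ++ p.2)) g)
      PySem.Dict.empty
  let merged : List (Int × List Int) :=
    gathered.items.foldl (fun acc p =>
      let unique := PySem.List.dedup p.2
      if unique = [] then acc else acc ++ [(p.1, unique)]) []
  PySem.List.sorted merged (fun q => q.1) false

-- ===== PRECONDITION & SPEC =====
def Spec_merge_user_interactions (sources : List (List (Int × List Int))) (out : List (Int × List Int)) : Prop := out = merge_user_interactions_alt sources
instance (sources : List (List (Int × List Int))) (out : List (Int × List Int)) : Decidable (Spec_merge_user_interactions sources out) := by unfold Spec_merge_user_interactions; infer_instance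

-- ===== CLAIM (what is proved, stated in full; the proofs are below) =====
def Claim_equal_merge_user_interactions : Prop := ∀ (sources : List (List (Int × List Int))), Dom_merge_user_interactions sources → Spec_merge_user_interactions sources (merge_user_interactions sources)

-- ===== LEMMAS AND PROOFS =====

-- named forms of the two outer loop bodies (proof-side only; definitionally equal to the
-- lambdas in the ports)
def pvStepA (st : PySem.Dict Int (List Int) × PySem.Dict Int (PySem.Set Int))
    (p : Int × List Int) : PySem.Dict Int (List Int) × PySem.Dict Int (PySem.Set Int) :=
  let seen := st.2.getD p.1 PySem.Set.empty
  let ms := p.2.foldl (fun (ms : PySem.Dict Int (List Int) × PySem.Set Int) item_id =>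
      if PySem.Set.contains ms.2 item_id then ms
      else (ms.1.modify p.1 [] (fun l => l ++ [item_id]), PySem.Set.add ms.2 item_id))
    (st.1, seen)
  (ms.1, st.2.insert p.1 ms.2)

def pvStepG (g : PySem.Dict Int (List Int)) (p : Int × List Int) : PySem.Dict Int (List Int) :=
  g.modify p.1 [] (fun l => l ++ p.2)

-- the items A appends for one user while folding `items` with seen-set s: what the growing
-- set gains beyond its first s.length elements
def pvNew (s : PySem.Set Int) (items : List Int) : List Int :=
  (items.foldl PySem.Set.add s).drop s.length

lemma prefix_foldl_add (l : List Int) (s : PySem.Set Int) : s <+: l.foldl PySem.Set.add s := by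
  induction l generalizing s with
  | nil => exact List.prefix_rfl
  | cons x t ih =>
    simp only [List.foldl_cons]
    refine List.IsPrefix.trans ?_ (ih (PySem.Set.add s x))
    simp only [PySem.Set.add]
    split
    · exact List.prefix_rfl
    · exact ⟨[x], rfl⟩

lemma append_pvNew (s : PySem.Set Int) (l : List Int) :
    s ++ pvNew s l = l.foldl PySem.Set.add s := by
  obtain ⟨r, hr⟩ := prefix_foldl_add l s
  simp [pvNew, ← hr]

lemma set_add_mem (s : PySem.Set Int) (x : Int) (h : PySem.Set.contains s x = true) :
    PySem.Set.add s x = s := by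
  simp [PySem.Set.add, List.mem_of_elem_eq_true h]

lemma set_add_not_mem (s : PySem.Set Int) (x : Int) (h : PySem.Set.contains s x = false) :
    PySem.Set.add s x = s ++ [x] := by
  have hm : x ∉ s := by simp [PySem.Set.contains] at h; exact h
  simp [PySem.Set.add, hm]

lemma pvNew_cons_mem (s : PySem.Set Int) (it : Int) (t : List Int)
    (h : PySem.Set.contains s it = true) : pvNew s (it :: t) = pvNew s t := by
  simp [pvNew, set_add_mem s it h]

lemma pvNew_cons_not_mem (s : PySem.Set Int) (it : Int) (t : List Int)
    (h : PySem.Set.contains s it = false) :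
    pvNew s (it :: t) = it :: pvNew (s ++ [it]) t := by
  have hadd : PySem.Set.add s it = s ++ [it] := set_add_not_mem s it h
  obtain ⟨r, hr⟩ := prefix_foldl_add t (s ++ [it])
  simp only [pvNew, List.foldl_cons, hadd, ← hr]
  rw [List.append_assoc, List.singleton_append, List.drop_left,
      show s ++ it :: r = (s ++ [it]) ++ r by simp, List.drop_left]

-- A's inner item loop, closed form: the merged dict receives exactly pvNew s items (in order)
-- and the seen set becomes the fold of adds
lemma inner_loop (u : Int) (items : List Int) (m : PySem.Dict Int (List Int)) (s : PySem.Set Int) :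
    items.foldl (fun (ms : PySem.Dict Int (List Int) × PySem.Set Int) item_id =>
        if PySem.Set.contains ms.2 item_id then ms
        else (ms.1.modify u [] (fun l => l ++ [item_id]), PySem.Set.add ms.2 item_id)) (m, s)
      = ((pvNew s items).foldl (fun d x => d.modify u [] (fun l => l ++ [x])) m,
         items.foldl PySem.Set.add s) := by
  induction items generalizing m s with
  | nil => simp [pvNew]
  | cons it t ih =>
    simp only [List.foldl_cons]
    by_cases h : PySem.Set.contains s it = true
    · rw [if_pos h, ih m s, pvNew_cons_mem s it t h, set_add_mem s it h]
    · have h' : PySem.Set.contains s it = false := by simpa using h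
      rw [if_neg h, set_add_not_mem s it h',
          ih (m.modify u [] (fun l => l ++ [it])) (s ++ [it]),
          pvNew_cons_not_mem s it t h', List.foldl_cons]

lemma getD_modify_fold (u v : Int) (l : List Int) (m : PySem.Dict Int (List Int)) :
    (l.foldl (fun d x => d.modify u [] (fun t => t ++ [x])) m).getD v []
      = if v = u then m.getD v [] ++ l else m.getD v [] := by
  induction l generalizing m with
  | nil => simp
  | cons x t ih =>
    simp only [List.foldl_cons, ih, PySem.Dict.getD_modify]
    by_cases h : v = u <;> simp [h]

lemma keys_modify_fold (u : Int) (l : List Int) (m : PySem.Dict Int (List Int)) :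
    (l.foldl (fun d x => d.modify u [] (fun t => t ++ [x])) m).keys
      = PySem.Set.update m.keys (l.map (fun _ => u)) :=
  PySem.Dict.keys_foldl_modify_key l (fun _ => u) [] (fun _ x => (fun t => t ++ [x])) m

lemma nodup_modify_fold (u : Int) (l : List Int) (m : PySem.Dict Int (List Int))
    (h : m.keys.Nodup) :
    (l.foldl (fun d x => d.modify u [] (fun t => t ++ [x])) m).keys.Nodup :=
  PySem.Dict.nodup_keys_foldl_modify_key l (fun _ => u) [] (fun _ x => (fun t => t ++ [x])) m h

lemma ofList_append (c items : List Int) :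
    PySem.Set.ofList (c ++ items) = items.foldl PySem.Set.add (PySem.Set.ofList c) := by
  simp [PySem.Set.ofList_eq_foldl, List.foldl_append]

-- dedup (c ++ items) = dedup c ++ pvNew (ofList c) items
lemma dedup_append (c items : List Int) :
    PySem.List.dedup (c ++ items)
      = PySem.List.dedup c ++ pvNew (PySem.Set.ofList c) items := by
  rw [PySem.List.dedup_eq_ofList, PySem.List.dedup_eq_ofList, ofList_append,
      ← append_pvNew (PySem.Set.ofList c) items]

-- one step of A's outer loop, in closed form
lemma stepA_eq (st : PySem.Dict Int (List Int) × PySem.Dict Int (PySem.Set Int))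
    (p : Int × List Int) :
    pvStepA st p
      = ((pvNew (st.2.getD p.1 PySem.Set.empty) p.2).foldl
            (fun d x => d.modify p.1 [] (fun l => l ++ [x])) st.1,
         st.2.insert p.1 (p.2.foldl PySem.Set.add (st.2.getD p.1 PySem.Set.empty))) := by
  simp only [pvStepA, inner_loop]

-- the main loop invariant: A's (merged, seen) state tracks B's gathered dict
lemma main_inv (ps : List (Int × List Int)) (m : PySem.Dict Int (List Int))
    (s : PySem.Dict Int (PySem.Set Int)) (g : PySem.Dict Int (List Int))
    (h1 : ∀ v, m.getD v [] = PySem.List.dedup (g.getD v []))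
    (h2 : ∀ v, s.getD v PySem.Set.empty = PySem.Set.ofList (g.getD v []))
    (h3 : m.keys.Nodup)
    (h4 : ∀ v, v ∈ m.keys ↔ PySem.List.dedup (g.getD v []) ≠ []) :
    (∀ v, (ps.foldl pvStepA (m, s)).1.getD v []
        = PySem.List.dedup ((ps.foldl pvStepG g).getD v []))
    ∧ (ps.foldl pvStepA (m, s)).1.keys.Nodup
    ∧ (∀ v, v ∈ (ps.foldl pvStepA (m, s)).1.keys
        ↔ PySem.List.dedup ((ps.foldl pvStepG g).getD v []) ≠ []) := by
  induction ps generalizing m s g with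
  | nil => exact ⟨h1, h3, h4⟩
  | cons p t ih =>
    obtain ⟨u, items⟩ := p
    simp only [List.foldl_cons, stepA_eq, h2 u]
    refine ih _ _ _ ?_ ?_ ?_ ?_
    · intro v
      rw [getD_modify_fold]
      simp only [pvStepG, PySem.Dict.getD_modify]
      by_cases h : v = u
      · rw [if_pos h, if_pos h, h, h1 u, dedup_append]
      · rw [if_neg h, if_neg h, h1 v]
    · intro v
      simp only [pvStepG, PySem.Dict.getD_modify]
      by_cases h : v = u
      · rw [PySem.Dict.getD_insert, if_pos h, if_pos h, ofList_append]
      · rw [PySem.Dict.getD_insert, if_neg h, if_neg h]; exact h2 v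
    · exact nodup_modify_fold u _ m h3
    · intro v
      rw [keys_modify_fold]
      simp only [pvStepG, PySem.Dict.getD_modify]
      rw [PySem.Set.mem_update]
      by_cases h : v = u
      · rw [if_pos h, h, dedup_append]
        constructor
        · rintro (hd | hml)
          · have hne := (h4 u).mp hd
            intro hnil
            rw [List.append_eq_nil_iff] at hnil
            exact hne hnil.1
          · obtain ⟨a, ha, -⟩ := List.mem_map.mp hml
            intro hnil
            rw [List.append_eq_nil_iff] at hnil
            exact List.ne_nil_of_mem ha hnil.2
        · intro hne
          by_cases hd : PySem.List.dedup (g.getD u []) = []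
          · right
            rcases hl' : pvNew (PySem.Set.ofList (g.getD u [])) items with _ | ⟨a, tl⟩
            · exact absurd (by rw [hd, hl']; rfl) hne
            · exact List.mem_map.mpr ⟨a, by simp, rfl⟩
          · exact Or.inl ((h4 u).mpr hd)
      · rw [if_neg h]
        constructor
        · rintro (hm' | hml)
          · exact (h4 v).mp hm'
          · obtain ⟨a, -, ha⟩ := List.mem_map.mp hml
            exact absurd ha.symm h
        · exact fun hh => Or.inl ((h4 v).mpr hh)

-- B's merged-building loop in closed form
lemma blist_eq (items : List (Int × List Int)) (acc : List (Int × List Int)) :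
    items.foldl (fun acc p =>
        if PySem.List.dedup p.2 = [] then acc else acc ++ [(p.1, PySem.List.dedup p.2)]) acc
      = acc ++ (items.filter (fun p => !(PySem.List.dedup p.2 == []))).map
          (fun p => (p.1, PySem.List.dedup p.2)) := by
  induction items generalizing acc with
  | nil => simp
  | cons p t ih =>
    simp only [List.foldl_cons, List.filter_cons]
    by_cases h : PySem.List.dedup p.2 = []
    · have h' : PySem.Set.ofList p.2 = [] := by simpa using h
      rw [if_pos h, ih]; simp [h']
    · have h' : ¬ PySem.Set.ofList p.2 = [] := by simpa using h
      rw [if_neg h, ih]; simp [h', List.isEmpty_eq_false_iff]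

-- facts about B's gathered dict
lemma gathered_nodup (ps : List (Int × List Int)) :
    (ps.foldl pvStepG PySem.Dict.empty).keys.Nodup :=
  PySem.Dict.nodup_keys_foldl_modify_key ps Prod.fst [] (fun _ p => (fun l => l ++ p.2))
    PySem.Dict.empty (by simp)

lemma mem_keys_of_dedup_ne_nil (G : PySem.Dict Int (List Int)) (v : Int)
    (hv : PySem.List.dedup (G.getD v []) ≠ []) : v ∈ G.keys := by
  by_contra hnk
  have hc : G.contains v = false := by
    rw [PySem.Dict.contains_eq_decide_mem_keys]; simp [hnk]
  have h0 : G.getD v ([] : List Int) = [] := PySem.Dict.getD_of_not_contains G [] hc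
  rw [h0] at hv
  simp [PySem.List.dedup_eq_ofList, PySem.Set.ofList] at hv

-- ===== VERDICT (by name: the statement is the Claim_ definition above) =====
theorem merge_user_interactions_spec : Claim_equal_merge_user_interactions := by
  intro sources _
  unfold Spec_merge_user_interactions merge_user_interactions merge_user_interactions_alt
  show PySem.List.sorted
      (sources.foldl (fun st source => source.foldl pvStepA st)
        (PySem.Dict.empty, PySem.Dict.empty)).1.items (fun q => q.1) false
    = PySem.List.sorted
      ((sources.foldl (fun g source => source.foldl pvStepG g) PySem.Dict.empty).items.foldl
        (fun acc p => if PySem.List.dedup p.2 = [] then acc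
          else acc ++ [(p.1, PySem.List.dedup p.2)]) []) (fun q => q.1) false
  rw [← List.foldl_flatten, ← List.foldl_flatten]
  set ps := sources.flatten with hps
  set G := ps.foldl pvStepG PySem.Dict.empty with hG
  set M := (ps.foldl pvStepA (PySem.Dict.empty, PySem.Dict.empty)).1 with hM
  obtain ⟨hmg, hnd, hmem⟩ := main_inv ps PySem.Dict.empty PySem.Dict.empty PySem.Dict.empty
    (by intro v; simp [PySem.List.dedup_eq_ofList, PySem.Set.ofList])
    (by intro v; simp [PySem.Set.ofList]) (by simp)
    (by intro v; simp [PySem.List.dedup_eq_ofList, PySem.Set.ofList])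
  have Gnd : G.keys.Nodup := gathered_nodup ps
  -- characterize both pair lists as images of key lists
  have hMitems : M.items = M.keys.map (fun k => (k, PySem.List.dedup (G.getD k []))) := by
    rw [PySem.Dict.items_eq_map_keys M hnd []]
    exact List.map_congr_left (fun k _ => by rw [hmg k])
  rw [blist_eq, List.nil_append, PySem.Dict.items_eq_map_keys G Gnd [],
      List.filter_map, List.map_map]
  set P : Int → Bool := fun k => !(PySem.List.dedup (G.getD k []) == []) with hP
  set F : Int → Int × List Int := fun k => (k, PySem.List.dedup (G.getD k [])) with hF
  have hfil : List.filter ((fun p => !(PySem.List.dedup p.2 == [])) ∘ fun k => (k, G.getD k []))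
      G.keys = G.keys.filter P :=
    List.filter_congr (fun k _ => rfl)
  have hmap : ((fun p => (p.1, PySem.List.dedup p.2)) ∘ fun k => (k, G.getD k [])) = F := by
    funext k; simp [hF]
  rw [hfil, hmap]
  -- the two pair lists are permutations of each other
  have hKperm : M.keys.Perm (G.keys.filter P) := by
    apply (List.perm_ext_iff_of_nodup hnd (Gnd.filter P)).mpr
    intro v
    rw [List.mem_filter, hmem v]
    constructor
    · intro hv
      exact ⟨mem_keys_of_dedup_ne_nil G v hv, by simpa [hP] using hv⟩
    · rintro ⟨-, hv⟩
      simpa [hP] using hv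
  have hPerm : M.items.Perm ((G.keys.filter P).map F) := by
    rw [hMitems]
    exact hKperm.map F
  -- both sides sort a permutation of the same distinct-key pairs by key: equal
  apply PySem.List.sorted_eq_of_perm_of_pairwise_lt
  · exact (PySem.List.sorted_perm ((G.keys.filter P).map F) (fun q => q.1) false).trans hPerm.symm
  · have hle := PySem.List.sorted_pairwise ((G.keys.filter P).map F) (fun q => q.1)
    have hmapfst : List.Perm ((PySem.List.sorted ((G.keys.filter P).map F)
        (fun q => q.1) false).map Prod.fst) (G.keys.filter P) := by
      refine ((PySem.List.sorted_perm _ _ _).map Prod.fst).trans ?_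
      rw [List.map_map]
      have hid : (Prod.fst ∘ F) = id := by funext k; simp [hF]
      rw [hid, List.map_id]
    have hndfst := hmapfst.nodup_iff.mpr (Gnd.filter P)
    have hne : (PySem.List.sorted ((G.keys.filter P).map F) (fun q => q.1) false).Pairwise
        (fun a b => a.1 ≠ b.1) := List.pairwise_map.mp hndfst
    exact (hle.and hne).imp (fun h => lt_of_le_of_ne h.1 h.2)
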